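-- pv_equiv track=rewrite | github.com/loweege/SAT-with-Binary-Decision-Diagrams | model-checking/sol.py | selective_configuration
-- ===== SOURCE A (Python) =====
-- def selective_configuration(num_clauses, variable_order, clauses):
--     E = []
--     assignment = {}
--
--     relevant_variables = set()
--     for clause in clauses:
--         for literal in clause:
--             relevant_variables.add(abs(literal))
--
--
--     def is_global_satisfiable(feature):
--         for clause in clauses:
--             if feature in clause or -feature in clause:
--                 clause_satisfied = False
--                 for literal in clause:
--                     var = abs(literal)
--                     if literal > 0 and assignment.get(var, -1) == 1:  # Positive literal must be 1
--                         clause_satisfied = True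
--                         break
--                     elif literal < 0 and assignment.get(var, -1) == 0:  # Negative literal must be 0
--                         clause_satisfied = True
--                         break
--                 if not clause_satisfied:
--                     return False
--         return True
--
--
--     for feature in variable_order:
--         if feature not in relevant_variables:
--             continue
--
--
--         assignment[feature] = 1
--         E.append((feature, 1))
--
--         if is_global_satisfiable(feature):
--             break
--
--         assignment[feature] = 0  # Deselect the feature (set to 0)
--         E[-1] = (feature, 0)  # Update the decision in the list
--
--         if is_global_satisfiable(feature):
--             break  # Stop early if the CNF is satisfied
--
--     return len(E), E  # Return the number of decisions made and the decisions themselves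
-- ===== SOURCE B (Python) =====
-- def selective_configuration(num_clauses, variable_order, clauses):
--     # Index: variable -> list of clauses mentioning it; each check walks
--     # only the indexed clauses of the feature rather than scanning all clauses.
--     index = {}
--     for clause in clauses:
--         for lit in clause:
--             index.setdefault(abs(lit), []).append(clause)
--
--     assignment = {}
--
--     def lit_true(l):
--         if l > 0:
--             return assignment.get(l, -1) == 1
--         return l < 0 and assignment.get(-l, -1) == 0
--
--     def satisfied_around(feature):
--         return all(any(lit_true(l) for l in clause) for clause in index[feature])
--
--     E = []
--     for feature in variable_order:
--         if feature not in index: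
--             continue
--         assignment[feature] = 1
--         if satisfied_around(feature):
--             E.append((feature, 1))
--             return len(E), E
--         assignment[feature] = 0
--         E.append((feature, 0))
--         if satisfied_around(feature):
--             return len(E), E
--     return len(E), E
-- ===== Notes on version B (the rewrite author's own statement) =====
-- stated objective: alternative
-- what changed: B builds a variable-to-clauses index once and each satisfiability check walks only the indexed clauses of the feature, instead of A's scan of all clauses with a per-clause membership test; it trades the index build for cheaper checks, which was not measurably faster on the benchmark inputs.
import Mathlib
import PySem

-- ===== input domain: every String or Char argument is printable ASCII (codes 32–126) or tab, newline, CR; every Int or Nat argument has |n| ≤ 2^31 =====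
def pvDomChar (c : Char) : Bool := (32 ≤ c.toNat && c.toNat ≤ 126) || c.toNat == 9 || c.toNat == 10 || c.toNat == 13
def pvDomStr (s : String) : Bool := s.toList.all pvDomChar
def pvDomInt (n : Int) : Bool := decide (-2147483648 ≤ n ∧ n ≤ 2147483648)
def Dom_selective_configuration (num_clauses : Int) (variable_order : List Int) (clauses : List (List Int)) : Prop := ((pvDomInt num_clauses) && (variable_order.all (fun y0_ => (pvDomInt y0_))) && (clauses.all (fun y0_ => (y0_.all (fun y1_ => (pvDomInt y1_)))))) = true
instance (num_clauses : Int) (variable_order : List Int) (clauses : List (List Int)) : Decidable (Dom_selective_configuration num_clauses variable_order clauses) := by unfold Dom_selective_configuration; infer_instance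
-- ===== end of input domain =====

-- B builds a variable→clauses index once and each satisfiability check walks only the
-- indexed clauses of the feature, instead of A's scan of all clauses (objective: alternative).

-- ===== PORT A =====

-- inner 'for literal in clause' loop with break (clause_satisfied flag)
def pvAClauseSat (a : PySem.Dict Int Int) : List Int → Bool
  | [] => false
  | l :: rest =>
    if l > 0 && (a.getD |l| (-1) == 1) then true
    else if l < 0 && (a.getD |l| (-1) == 0) then true
    else pvAClauseSat a rest

-- is_global_satisfiable: scans ALL clauses, filters by membership of ±feature
def pvAGlobalSat (clauses : List (List Int)) (a : PySem.Dict Int Int) (feature : Int) : Bool :=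
  match clauses with
  | [] => true
  | c :: rest =>
    if c.contains feature || c.contains (-feature) then
      if pvAClauseSat a c then pvAGlobalSat rest a feature else false
    else pvAGlobalSat rest a feature

def pvARelevant (clauses : List (List Int)) : PySem.Set Int :=
  clauses.foldl (fun s c => c.foldl (fun s l => s.add |l|) s) PySem.Set.empty

-- the main 'for feature in variable_order' loop; E[-1] = (f, 0) is dropLast ++ [(f,0)]
def pvALoop (clauses : List (List Int)) (rel : PySem.Set Int) :
    List Int → List (Int × Int) → PySem.Dict Int Int → List (Int × Int)
  | [], E, _ => E
  | f :: rest, E, a =>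
    if !(rel.contains f) then pvALoop clauses rel rest E a
    else
      let a1 := a.insert f 1
      let E1 := E ++ [(f, 1)]
      if pvAGlobalSat clauses a1 f then E1
      else
        let a0 := a1.insert f 0
        let E0 := E1.dropLast ++ [(f, 0)]
        if pvAGlobalSat clauses a0 f then E0
        else pvALoop clauses rel rest E0 a0

def selective_configuration (num_clauses : Int) (variable_order : List Int) (clauses : List (List Int)) : Int × (List (Int × Int)) :=
  let rel := pvARelevant clauses
  let E := pvALoop clauses rel variable_order [] PySem.Dict.empty
  ((E.length : Int), E)

-- ===== PORT B =====

-- variable → list of clauses mentioning it (setdefault(abs(lit), []).append(clause))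
def pvBIndex (clauses : List (List Int)) : PySem.Dict Int (List (List Int)) :=
  clauses.foldl (fun d c => c.foldl (fun d l => d.modify |l| [] (· ++ [c])) d) PySem.Dict.empty

def pvBLitTrue (a : PySem.Dict Int Int) (l : Int) : Bool :=
  if l > 0 then a.getD l (-1) == 1
  else decide (l < 0) && (a.getD (-l) (-1) == 0)

def pvBSatAround (idx : PySem.Dict Int (List (List Int))) (a : PySem.Dict Int Int) (feature : Int) : Bool :=
  (idx.getD feature []).all (fun c => c.any (pvBLitTrue a))

def pvBLoop (idx : PySem.Dict Int (List (List Int))) :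
    List Int → List (Int × Int) → PySem.Dict Int Int → List (Int × Int)
  | [], E, _ => E
  | f :: rest, E, a =>
    if !(idx.contains f) then pvBLoop idx rest E a
    else
      let a1 := a.insert f 1
      if pvBSatAround idx a1 f then E ++ [(f, 1)]
      else
        let a0 := a1.insert f 0
        let E' := E ++ [(f, 0)]
        if pvBSatAround idx a0 f then E' else pvBLoop idx rest E' a0

def selective_configuration_alt (num_clauses : Int) (variable_order : List Int) (clauses : List (List Int)) : Int × (List (Int × Int)) :=
  let idx := pvBIndex clauses
  let E := pvBLoop idx variable_order [] PySem.Dict.empty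
  ((E.length : Int), E)

-- ===== PRECONDITION & SPEC =====
def Spec_selective_configuration (num_clauses : Int) (variable_order : List Int) (clauses : List (List Int)) (out : Int × (List (Int × Int))) : Prop := out = selective_configuration_alt num_clauses variable_order clauses
instance (num_clauses : Int) (variable_order : List Int) (clauses : List (List Int)) (out : Int × (List (Int × Int))) : Decidable (Spec_selective_configuration num_clauses variable_order clauses out) := by unfold Spec_selective_configuration; infer_instance

-- ===== CLAIM (what is proved, stated in full; the proofs are below) =====
def Claim_equal_selective_configuration : Prop := ∀ (num_clauses : Int) (variable_order : List Int) (clauses : List (List Int)), Dom_selective_configuration num_clauses variable_order clauses → Spec_selective_configuration num_clauses variable_order clauses (selective_configuration num_clauses variable_order clauses)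

-- ===== LEMMAS AND PROOFS =====

-- the common membership predicate: clause c mentions variable f
def pvMentions (f : Int) (c : List Int) : Bool := c.any (fun l => |l| == f)

lemma pvRelAux1 (c : List Int) (f : Int) : ∀ (s : PySem.Set Int),
    f ∈ c.foldl (fun s l => s.add |l|) s ↔ f ∈ s ∨ ∃ l ∈ c, |l| = f := by
  induction c with
  | nil => simp
  | cons l ls ih =>
    intro s
    simp only [List.foldl_cons, ih, PySem.Set.mem_add, List.mem_cons]
    constructor
    · rintro ((h | h) | ⟨x, hx, hfx⟩)
      · exact Or.inl h
      · exact Or.inr ⟨l, Or.inl rfl, h.symm⟩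
      · exact Or.inr ⟨x, Or.inr hx, hfx⟩
    · rintro (h | ⟨x, (rfl | hx), hfx⟩)
      · exact Or.inl (Or.inl h)
      · exact Or.inl (Or.inr hfx.symm)
      · exact Or.inr ⟨x, hx, hfx⟩

lemma pvARelevant_mem (clauses : List (List Int)) (f : Int) :
    (f ∈ pvARelevant clauses) ↔ ∃ c ∈ clauses, pvMentions f c = true := by
  unfold pvARelevant
  have aux : ∀ (cls : List (List Int)) (s : PySem.Set Int),
      f ∈ cls.foldl (fun s c => c.foldl (fun s l => s.add |l|) s) s ↔
        f ∈ s ∨ ∃ c ∈ cls, pvMentions f c = true := by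
    intro cls
    induction cls with
    | nil => simp
    | cons c cs ih =>
      intro s
      simp only [List.foldl_cons, ih, pvRelAux1, List.mem_cons, pvMentions, List.any_eq_true,
        beq_iff_eq]
      constructor
      · rintro ((h | ⟨l, hl, hlf⟩) | ⟨c', hc', l, hl, hlf⟩)
        · exact Or.inl h
        · exact Or.inr ⟨c, Or.inl rfl, l, hl, hlf⟩
        · exact Or.inr ⟨c', Or.inr hc', l, hl, hlf⟩
      · rintro (h | ⟨c', (rfl | hc'), l, hl, hlf⟩)
        · exact Or.inl (Or.inl h)
        · exact Or.inl (Or.inr ⟨l, hl, hlf⟩)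
        · exact Or.inr ⟨c', hc', l, hl, hlf⟩
  simp [aux, PySem.Set.empty]

lemma pvBIndexAux1 (c ls : List Int) (f : Int) : ∀ (d : PySem.Dict Int (List (List Int))),
    (ls.foldl (fun d l => d.modify |l| [] (· ++ [c])) d).getD f [] =
      d.getD f [] ++ List.replicate (ls.countP (fun l => |l| == f)) c := by
  induction ls with
  | nil => simp
  | cons l ls ih =>
    intro d
    simp only [List.foldl_cons, ih, List.countP_cons]
    by_cases h : |l| = f
    · subst h
      rw [PySem.Dict.getD_modify_self]
      simp [List.replicate_succ]
    · rw [PySem.Dict.getD_modify_of_ne _ _ _ (fun hf => h hf.symm)]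
      simp [h]

lemma pvBIndex_getD (clauses : List (List Int)) (f : Int) :
    (pvBIndex clauses).getD f [] =
      clauses.flatMap (fun c => List.replicate (c.countP (fun l => |l| == f)) c) := by
  unfold pvBIndex
  have aux : ∀ (cls : List (List Int)) (d : PySem.Dict Int (List (List Int))),
      (cls.foldl (fun d c => c.foldl (fun d l => d.modify |l| [] (· ++ [c])) d) d).getD f [] =
        d.getD f [] ++ cls.flatMap (fun c => List.replicate (c.countP (fun l => |l| == f)) c) := by
    intro cls
    induction cls with
    | nil => simp
    | cons c cs ih => intro d; simp [List.foldl_cons, ih, pvBIndexAux1]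
  simp [aux, pysem]

lemma pvBIndexAux2 (c ls : List Int) (f : Int) : ∀ (d : PySem.Dict Int (List (List Int))),
    (ls.foldl (fun d l => d.modify |l| [] (· ++ [c])) d).contains f = true ↔
      d.contains f = true ∨ ∃ l ∈ ls, |l| = f := by
  induction ls with
  | nil => simp
  | cons l ls ih =>
    intro d
    simp only [List.foldl_cons, ih, PySem.Dict.contains_modify, Bool.or_eq_true, beq_iff_eq,
      List.mem_cons]
    constructor
    · rintro ((h | h) | ⟨x, hx, hfx⟩)
      · exact Or.inr ⟨l, Or.inl rfl, h.symm⟩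
      · exact Or.inl h
      · exact Or.inr ⟨x, Or.inr hx, hfx⟩
    · rintro (h | ⟨x, (rfl | hx), hfx⟩)
      · exact Or.inl (Or.inr h)
      · exact Or.inl (Or.inl hfx.symm)
      · exact Or.inr ⟨x, hx, hfx⟩

lemma pvBIndex_contains (clauses : List (List Int)) (f : Int) :
    (pvBIndex clauses).contains f = true ↔ ∃ c ∈ clauses, pvMentions f c = true := by
  unfold pvBIndex
  have aux : ∀ (cls : List (List Int)) (d : PySem.Dict Int (List (List Int))),
      (cls.foldl (fun d c => c.foldl (fun d l => d.modify |l| [] (· ++ [c])) d) d).contains f = true ↔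
        d.contains f = true ∨ ∃ c ∈ cls, pvMentions f c = true := by
    intro cls
    induction cls with
    | nil => simp
    | cons c cs ih =>
      intro d
      simp only [List.foldl_cons, ih, pvBIndexAux2, List.mem_cons, pvMentions, List.any_eq_true,
        beq_iff_eq]
      constructor
      · rintro ((h | ⟨l, hl, hlf⟩) | ⟨c', hc', l, hl, hlf⟩)
        · exact Or.inl h
        · exact Or.inr ⟨c, Or.inl rfl, l, hl, hlf⟩
        · exact Or.inr ⟨c', Or.inr hc', l, hl, hlf⟩
      · rintro (h | ⟨c', (rfl | hc'), l, hl, hlf⟩)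
        · exact Or.inl (Or.inl h)
        · exact Or.inl (Or.inr ⟨l, hl, hlf⟩)
        · exact Or.inr ⟨c', hc', l, hl, hlf⟩
  simp [aux, PySem.Dict.contains_empty]

lemma pvContains_eq (clauses : List (List Int)) (f : Int) :
    (pvARelevant clauses).contains f = (pvBIndex clauses).contains f := by
  rw [Bool.eq_iff_iff, PySem.Set.contains_iff, pvARelevant_mem, pvBIndex_contains]

lemma pvIfOr (b1 b2 b3 : Bool) :
    (if b1 then true else if b2 then true else b3) = (b1 || (b2 || b3)) := by
  cases b1 <;> cases b2 <;> simp

lemma pvLitTrue_char (a : PySem.Dict Int Int) (l : Int) :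
    pvBLitTrue a l =
      ((decide (l > 0) && (a.getD |l| (-1) == 1)) || (decide (l < 0) && (a.getD |l| (-1) == 0))) := by
  unfold pvBLitTrue
  by_cases hp : l > 0
  · rw [abs_of_pos hp]
    simp [hp, show ¬ l < 0 by omega]
  · by_cases hn : l < 0
    · rw [abs_of_neg hn]
      simp [hp, hn]
    · simp [hp, hn]

lemma pvClauseSat_eq (a : PySem.Dict Int Int) (c : List Int) :
    pvAClauseSat a c = c.any (pvBLitTrue a) := by
  induction c with
  | nil => rfl
  | cons l ls ih =>
    rw [List.any_cons, ← ih, pvAClauseSat, pvLitTrue_char, pvIfOr, Bool.or_assoc]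

lemma pvAGlobalSat_char (clauses : List (List Int)) (a : PySem.Dict Int Int) (f : Int) :
    pvAGlobalSat clauses a f = true ↔
      ∀ c ∈ clauses, (c.contains f || c.contains (-f)) = true → pvAClauseSat a c = true := by
  induction clauses with
  | nil => simp [pvAGlobalSat]
  | cons c cs ih =>
    rw [pvAGlobalSat]
    split_ifs with h1 h2
    · rw [ih]
      constructor
      · intro h x hx hm
        rcases List.mem_cons.mp hx with rfl | hx'
        · exact h2
        · exact h x hx' hm
      · intro h x hx hm
        exact h x (List.mem_cons.mpr (Or.inr hx)) hm
    · constructor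
      · intro h
        exact absurd h (by simp)
      · intro h
        exact absurd (h c (List.mem_cons_self) h1) h2
    · rw [ih]
      constructor
      · intro h x hx hm
        rcases List.mem_cons.mp hx with rfl | hx'
        · exact absurd hm h1
        · exact h x hx' hm
      · intro h x hx hm
        exact h x (List.mem_cons.mpr (Or.inr hx)) hm

lemma pvMentions_of_nonneg (f : Int) (hf : 0 ≤ f) (c : List Int) :
    (c.contains f || c.contains (-f)) = pvMentions f c := by
  rw [Bool.eq_iff_iff]
  simp only [Bool.or_eq_true, List.contains_iff_mem, pvMentions, List.any_eq_true, beq_iff_eq]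
  constructor
  · rintro (h | h)
    · exact ⟨f, h, abs_of_nonneg hf⟩
    · exact ⟨-f, h, by rw [abs_neg, abs_of_nonneg hf]⟩
  · rintro ⟨l, hl, hfl⟩
    rcases abs_cases l with ⟨h1, _⟩ | ⟨h1, _⟩
    · left; rw [← hfl, h1]; exact hl
    · right; rw [← hfl, h1, neg_neg]; exact hl

lemma pvGlobalSat_eq (clauses : List (List Int)) (a : PySem.Dict Int Int) (f : Int) (hf : 0 ≤ f) :
    pvAGlobalSat clauses a f = pvBSatAround (pvBIndex clauses) a f := by
  rw [Bool.eq_iff_iff, pvAGlobalSat_char]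
  unfold pvBSatAround
  rw [pvBIndex_getD, List.all_eq_true]
  constructor
  · intro h c hc
    rw [List.mem_flatMap] at hc
    obtain ⟨c0, hc0, hcr⟩ := hc
    obtain rfl := List.eq_of_mem_replicate hcr
    have hpos : 0 < c.countP (fun l => |l| == f) := by
      rcases Nat.eq_zero_or_pos (c.countP (fun l => |l| == f)) with h0 | h0
      · rw [h0] at hcr; simp at hcr
      · exact h0
    have hm : pvMentions f c = true := by
      rw [List.countP_pos_iff] at hpos
      obtain ⟨l, hl, hlf⟩ := hpos
      exact List.any_eq_true.mpr ⟨l, hl, hlf⟩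
    rw [← pvClauseSat_eq]
    exact h c hc0 (by rw [pvMentions_of_nonneg f hf]; exact hm)
  · intro h c hc hm
    rw [pvMentions_of_nonneg f hf] at hm
    rw [pvClauseSat_eq]
    refine h c ?_
    rw [List.mem_flatMap]
    refine ⟨c, hc, ?_⟩
    have hpos : 0 < c.countP (fun l => |l| == f) := by
      rw [List.countP_pos_iff]
      simpa only [pvMentions, List.any_eq_true] using hm
    exact List.mem_replicate.mpr ⟨by omega, rfl⟩

lemma pvLoop_eq (clauses : List (List Int)) (vo : List Int) (E : List (Int × Int)) (a : PySem.Dict Int Int) :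
    pvALoop clauses (pvARelevant clauses) vo E a = pvBLoop (pvBIndex clauses) vo E a := by
  induction vo generalizing E a with
  | nil => rfl
  | cons f rest ih =>
    rw [pvALoop, pvBLoop, pvContains_eq]
    by_cases hc : (pvBIndex clauses).contains f = true
    · have hf : 0 ≤ f := by
        rw [pvBIndex_contains] at hc
        obtain ⟨c, _, hm⟩ := hc
        obtain ⟨l, _, hlf⟩ := List.any_eq_true.mp hm
        rw [beq_iff_eq] at hlf
        rw [← hlf]; exact abs_nonneg l
      rw [hc]
      simp only [Bool.not_true, Bool.false_eq_true, if_false, pvGlobalSat_eq _ _ _ hf,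
        List.dropLast_concat]
      split_ifs <;> first | rfl | exact ih _ _
    · simp only [Bool.not_eq_true] at hc
      rw [hc]
      simp only [Bool.not_false, if_true]
      exact ih _ _

-- ===== VERDICT (by name: the statement is the Claim_ definition above) =====
theorem selective_configuration_spec : Claim_equal_selective_configuration := by
  intro nc vo clauses _
  unfold Spec_selective_configuration selective_configuration selective_configuration_alt
  simp only [pvLoop_eq]
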